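-- pv_equiv track=rewrite | github.com/gus1043/Algorithm-SQL-Study | 프로그래머스/2/12973. 짝지어 제거하기/짝지어 제거하기.py | solution
-- ===== SOURCE A (Python) =====
-- def solution(s):
--     answer = 0
--     temp=[]
--     for i in s:
--         if len(temp)==0 or temp[-1]!=i:
--                 temp.append(i)
--         elif temp[-1]==i:
--             temp.pop()
--
--     if len(temp)==0:
--         answer=1
--
--     return answer
-- ===== SOURCE B (Python) =====
-- def _pass(s):
--     # one left-to-right scan removing non-overlapping adjacent equal pairs
--     out = []
--     i = 0
--     while i < len(s):
--         if i + 1 < len(s) and s[i] == s[i + 1]: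
--             i += 2
--         else:
--             out.append(s[i])
--             i += 1
--     return ''.join(out)
--
--
-- def solution(s):
--     # iterate the pair-removal pass to a fixpoint
--     while True:
--         t = _pass(s)
--         if t == s:
--             return 1 if s == '' else 0
--         s = t
-- ===== Notes on version B (the rewrite author's own statement) =====
-- stated objective: alternative
-- what changed: Replaced the single-pass stack with iterated string reduction: repeatedly scan the string removing adjacent equal pairs until a fixpoint, then test emptiness.
import Mathlib
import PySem

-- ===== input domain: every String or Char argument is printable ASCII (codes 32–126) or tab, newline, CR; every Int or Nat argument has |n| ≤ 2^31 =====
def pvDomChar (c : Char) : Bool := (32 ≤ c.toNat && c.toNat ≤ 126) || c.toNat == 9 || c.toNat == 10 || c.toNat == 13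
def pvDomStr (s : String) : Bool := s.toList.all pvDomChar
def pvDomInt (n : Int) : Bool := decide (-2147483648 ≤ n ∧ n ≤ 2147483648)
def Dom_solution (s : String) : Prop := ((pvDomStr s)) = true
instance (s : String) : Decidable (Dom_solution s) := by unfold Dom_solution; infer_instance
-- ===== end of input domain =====

-- B iterates a pair-removal scan to a fixpoint instead of A's single stack pass (alternative decomposition).

-- ===== PORT A =====
-- Python stack `temp` encoded with its top at the HEAD: append = cons, temp[-1] = head?, pop = tail (exact stack encoding).
def stepA (temp : List Char) (i : Char) : List Char :=
  if temp.length = 0 ∨ temp.head? ≠ some i then i :: temp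
  else if temp.head? = some i then temp.tail
  else temp

def solution (s : String) : Int :=
  let temp := s.toList.foldl stepA []
  if temp.length = 0 then 1 else 0

-- ===== PORT B =====
-- one scan of Source B's `_pass`: remove non-overlapping adjacent equal pairs, left to right
def passB : List Char → List Char
  | a :: b :: r => if a = b then passB r else a :: passB (b :: r)
  | l => l

theorem passB_length_le (l : List Char) : (passB l).length ≤ l.length := by
  induction l using passB.induct with
  | case1 b r ih =>
      have e : passB (b :: b :: r) = passB r := by simp [passB]
      rw [e]; simp only [List.length_cons]; omega
  | case2 a b r hab ih =>
      have e : passB (a :: b :: r) = a :: passB (b :: r) := by simp [passB, hab]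
      rw [e]; simpa using ih
  | case3 l h => rcases l with _ | ⟨a, _ | ⟨b, r⟩⟩ <;> first | exact (h a b r rfl).elim | simp [passB]

theorem passB_eq_of_length (l : List Char) (h : (passB l).length = l.length) : passB l = l := by
  induction l using passB.induct with
  | case1 b r ih =>
      exfalso
      have hle := passB_length_le r
      have e : passB (b :: b :: r) = passB r := by simp [passB]
      rw [e] at h
      simp only [List.length_cons] at h
      omega
  | case2 a b r hab ih =>
      have e : passB (a :: b :: r) = a :: passB (b :: r) := by simp [passB, hab]
      rw [e] at h ⊢
      simp only [List.length_cons] at h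
      have hlen : (passB (b :: r)).length = (b :: r).length := by
        simp only [List.length_cons]; omega
      rw [ih hlen]
  | case3 l h' => rcases l with _ | ⟨a, _ | ⟨b, r⟩⟩ <;> first | exact (h' a b r rfl).elim | simp [passB]

theorem passB_lt (l : List Char) (h : passB l ≠ l) : (passB l).length < l.length :=
  Nat.lt_of_le_of_ne (passB_length_le l) (fun he => h (passB_eq_of_length l he))

-- Source B's `while True` loop: iterate the pass to a fixpoint
def loopB (l : List Char) : List Char :=
  if h : passB l = l then l else loopB (passB l)
termination_by l.length
decreasing_by exact passB_lt l h

def solution_alt (s : String) : Int :=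
  if loopB s.toList = [] then 1 else 0

-- ===== PRECONDITION & SPEC =====
def Spec_solution (s : String) (out : Int) : Prop := out = solution_alt s
instance (s : String) (out : Int) : Decidable (Spec_solution s out) := by unfold Spec_solution; infer_instance

-- ===== CLAIM (what is proved, stated in full; the proofs are below) =====
def Claim_equal_solution : Prop := ∀ (s : String), Dom_solution s → Spec_solution s (solution s)

-- ===== LEMMAS AND PROOFS =====

theorem stepA_nil (c : Char) : stepA [] c = [c] := by simp [stepA]

theorem stepA_push (x : Char) (xs : List Char) (c : Char) (h : x ≠ c) :
    stepA (x :: xs) c = c :: x :: xs := by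
  simp [stepA, h]

theorem stepA_pop (x : Char) (xs : List Char) : stepA (x :: xs) x = xs := by
  simp [stepA]

-- the stack never holds two equal adjacent elements
theorem chain_stepA (t : List Char) (c : Char)
    (h : List.IsChain (fun a b => a ≠ b) t) : List.IsChain (fun a b => a ≠ b) (stepA t c) := by
  cases t with
  | nil => rw [stepA_nil]; simp
  | cons x xs =>
    by_cases hxc : x = c
    · subst hxc; rw [stepA_pop]; exact h.tail
    · rw [stepA_push x xs c hxc]
      exact List.IsChain.cons h (by intro y hy; simp at hy; subst hy; exact Ne.symm hxc)

-- pushing then immediately processing the same char undoes the push (on an adjacent-distinct stack)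
theorem stepA_stepA (t : List Char) (c : Char)
    (h : List.IsChain (fun a b => a ≠ b) t) : stepA (stepA t c) c = t := by
  cases t with
  | nil => rw [stepA_nil, stepA_pop]
  | cons x xs =>
    by_cases hxc : x = c
    · subst hxc
      rw [stepA_pop]
      cases xs with
      | nil => exact stepA_nil x
      | cons y ys =>
        have hxy : x ≠ y := by
          have := (List.isChain_cons.mp h).1
          exact this y rfl
        exact stepA_push y ys x (Ne.symm hxy)
    · rw [stepA_push x xs c hxc, stepA_pop]

-- one removal pass does not change the fold result
theorem foldl_passB (l : List Char) (t : List Char)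
    (h : List.IsChain (fun a b => a ≠ b) t) :
    List.foldl stepA t (passB l) = List.foldl stepA t l := by
  induction l using passB.induct generalizing t with
  | case1 b r ih =>
      have e : passB (b :: b :: r) = passB r := by simp [passB]
      rw [e, ih t h]
      simp only [List.foldl_cons]
      rw [stepA_stepA t b h]
  | case2 a b r hab ih =>
      have e : passB (a :: b :: r) = a :: passB (b :: r) := by simp [passB, hab]
      rw [e]
      simp only [List.foldl_cons]
      exact ih (stepA t a) (chain_stepA t a h)
  | case3 l h' => rcases l with _ | ⟨a, _ | ⟨b, r⟩⟩ <;> first | exact (h' a b r rfl).elim | simp [passB]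

-- the whole fixpoint iteration does not change the fold result
theorem foldl_loopB (l : List Char) :
    List.foldl stepA [] (loopB l) = List.foldl stepA [] l := by
  induction l using loopB.induct with
  | case1 l hfix => rw [loopB, dif_pos hfix]
  | case2 l hfix ih =>
      rw [loopB, dif_neg hfix, ih, foldl_passB l [] (by simp)]

-- loopB reaches a fixpoint of passB
theorem passB_loopB (l : List Char) : passB (loopB l) = loopB l := by
  induction l using loopB.induct with
  | case1 l hfix => rw [loopB, dif_pos hfix]; exact hfix
  | case2 l hfix ih => rw [loopB, dif_neg hfix]; exact ih

-- a fixpoint of passB has no adjacent equal pair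
theorem chain_of_passB_fix (l : List Char) (h : passB l = l) :
    List.IsChain (fun a b => a ≠ b) l := by
  induction l using passB.induct with
  | case1 b r ih =>
      exfalso
      have e : passB (b :: b :: r) = passB r := by simp [passB]
      rw [e] at h
      have h1 := passB_length_le r
      have h2 := congrArg List.length h
      simp only [List.length_cons] at h2
      omega
  | case2 a b r hab ih =>
      have e : passB (a :: b :: r) = a :: passB (b :: r) := by simp [passB, hab]
      rw [e, List.cons.injEq] at h
      exact List.IsChain.cons (ih h.2) (by intro y hy; simp at hy; subst hy; exact hab)
  | case3 l h' => rcases l with _ | ⟨a, _ | ⟨b, r⟩⟩ <;> first | exact (h' a b r rfl).elim | simp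

-- folding an adjacent-distinct list onto a stack with a different top reverses it on top
theorem foldl_chain_reverse (r : List Char) (t : List Char)
    (hr : List.IsChain (fun a b => a ≠ b) r)
    (hht : ∀ a b, r.head? = some a → t.head? = some b → a ≠ b) :
    List.foldl stepA t r = r.reverse ++ t := by
  induction r generalizing t with
  | nil => rfl
  | cons c r' ih =>
      have hpush : stepA t c = c :: t := by
        cases t with
        | nil => exact stepA_nil c
        | cons x xs => exact stepA_push x xs c (Ne.symm (hht c x rfl rfl))
      simp only [List.foldl_cons, hpush]
      rw [ih (c :: t) hr.tail ?_]
      · simp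
      · intro a b ha hb
        simp only [List.head?_cons, Option.some.injEq] at hb
        subst hb
        have := (List.isChain_cons.mp hr).1
        intro hac; subst hac
        exact (this a ha) rfl

-- ===== VERDICT (by name: the statement is the Claim_ definition above) =====
theorem solution_spec : Claim_equal_solution := by
  intro s _
  unfold Spec_solution solution solution_alt
  have h1 : List.foldl stepA [] s.toList = (loopB s.toList).reverse := by
    rw [← foldl_loopB]
    rw [foldl_chain_reverse (loopB s.toList) []
        (chain_of_passB_fix _ (passB_loopB s.toList)) (by intro a b _ hb; simp at hb)]
    simp
  rw [h1]
  by_cases h : loopB s.toList = []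
  · simp [h]
  · have hne : (loopB s.toList).reverse.length ≠ 0 := by
      simp [List.length_eq_zero_iff, h]
    simp [h]
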